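-- pv_equiv track=rewrite | github.com/henriimmonen/shortestroute | src/apufunktiot.py | piirra_kartalle
-- ===== SOURCE A (Python) =====
-- def piirra_kartalle(alkuperainen_kartta, kuljettu_reitti):
--     """Pääfunktio kuljetun reitin piirtämiseksi kartalle
--
--     Args:
--         alkuperainen_kartta: _description_
--         kuljettu_reitti: Lista kuljetuista solmuista
--
--     Returns:
--         alkuperainen_kartta: Palautetaan muokattu versio kartasta
--     """
--     for rivi in enumerate(alkuperainen_kartta):
--         for sarake in enumerate(alkuperainen_kartta[rivi[0]]):
--             if (rivi[0], sarake[0]) in kuljettu_reitti: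
--                 alkuperainen_kartta[rivi[0]] = vaihda_merkki(
--                     sarake[0], alkuperainen_kartta[rivi[0]]
--                     )
--     return alkuperainen_kartta
--
-- def vaihda_merkki(sarake, kartan_rivi):
--     """Vaihdetaan kartasta kuljetun reitin paikalle '*' merkki
--
--     Args:
--         sarake: Sarakkeen indeksi, josta merkki vaihdetaan
--         kartan_rivi: Kartan rivi str-muodossa
--
--     Returns:
--         uusi_rivi: Palauttaa muokatun rivin
--     """
--     sarakkeen_loppu = sarake+1
--     if sarake+1 >= len(kartan_rivi):
--         uusi_rivi = kartan_rivi[:sarake] + '*'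
--     else:
--         uusi_rivi = kartan_rivi[:sarake] + '*' + kartan_rivi[sarakkeen_loppu:]
--     return uusi_rivi
-- ===== SOURCE B (Python) =====
-- def piirra_kartalle(alkuperainen_kartta, kuljettu_reitti):
--     # Iterate the route once instead of scanning the whole grid; mutates the list
--     # in place like the original and returns it.
--     for r, c in kuljettu_reitti:
--         if 0 <= r < len(alkuperainen_kartta):
--             rivi = alkuperainen_kartta[r]
--             if 0 <= c < len(rivi):
--                 alkuperainen_kartta[r] = rivi[:c] + '*' + rivi[c+1:]
--     return alkuperainen_kartta
-- ===== Notes on version B (the rewrite author's own statement) =====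
-- stated objective: faster
-- what changed: Instead of scanning every grid cell and doing a linear membership test of (row,col) in the route list, B iterates once over the route, bounds-checks each (r,c) and rewrites that single row; the nested grid traversal disappears.
import Mathlib
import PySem

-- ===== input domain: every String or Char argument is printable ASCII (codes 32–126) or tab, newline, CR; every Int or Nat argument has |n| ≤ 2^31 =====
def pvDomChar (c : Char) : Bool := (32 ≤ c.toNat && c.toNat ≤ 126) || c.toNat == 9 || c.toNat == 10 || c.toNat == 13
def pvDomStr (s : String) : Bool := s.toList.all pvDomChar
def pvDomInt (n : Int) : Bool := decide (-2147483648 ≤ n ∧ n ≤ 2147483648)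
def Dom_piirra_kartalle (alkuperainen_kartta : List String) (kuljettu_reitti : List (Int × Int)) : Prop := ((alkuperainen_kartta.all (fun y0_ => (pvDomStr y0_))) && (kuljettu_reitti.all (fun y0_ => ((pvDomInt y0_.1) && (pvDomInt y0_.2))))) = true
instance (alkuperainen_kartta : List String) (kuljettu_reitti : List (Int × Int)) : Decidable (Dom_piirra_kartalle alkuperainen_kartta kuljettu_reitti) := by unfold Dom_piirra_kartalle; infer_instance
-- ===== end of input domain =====

-- B replaces A's nested full-grid scan (membership test per cell) by a single pass over the
-- route itself; both Pythons mutate the input list in place and return it — the theorem here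
-- is about the returned value (the mutated contents are the same in both).

-- ===== PORT A =====
-- helper of A; Python slices kartan_rivi[:sarake] and kartan_rivi[sarakkeen_loppu:] with a
-- nonnegative index are exactly List.take / List.drop on the char list (sarake comes from
-- enumerate, hence a Nat).
def vaihda_merkki (sarake : Nat) (kartan_rivi : String) : String :=
  if sarake + 1 ≥ kartan_rivi.toList.length then
    String.ofList (kartan_rivi.toList.take sarake ++ ['*'])
  else
    String.ofList (kartan_rivi.toList.take sarake ++ ['*'] ++ kartan_rivi.toList.drop (sarake + 1))

-- outer loop = enumerate over the map (its length never changes); inner loop = enumerate over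
-- the row as it is when the inner loop starts (rebuilding a row keeps its length).
def piirra_kartalle (alkuperainen_kartta : List String) (kuljettu_reitti : List (Int × Int)) : List String :=
  (List.range alkuperainen_kartta.length).foldl (fun acc (r : Nat) =>
    (List.range (acc.getD r "").toList.length).foldl (fun acc2 (c : Nat) =>
      if ((r : Int), (c : Int)) ∈ kuljettu_reitti then
        acc2.set r (vaihda_merkki c (acc2.getD r ""))
      else acc2) acc) alkuperainen_kartta

-- ===== PORT B =====
def pvAltStep (acc : List String) (p : Int × Int) : List String :=
  if 0 ≤ p.1 ∧ p.1 < (acc.length : Int) then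
    if 0 ≤ p.2 ∧ p.2 < ((acc.getD p.1.toNat "").toList.length : Int) then
      acc.set p.1.toNat
        (String.ofList ((acc.getD p.1.toNat "").toList.take p.2.toNat ++ ['*']
          ++ (acc.getD p.1.toNat "").toList.drop (p.2.toNat + 1)))
    else acc
  else acc

def piirra_kartalle_alt (alkuperainen_kartta : List String) (kuljettu_reitti : List (Int × Int)) : List String :=
  kuljettu_reitti.foldl pvAltStep alkuperainen_kartta

-- ===== PRECONDITION & SPEC =====
def Spec_piirra_kartalle (alkuperainen_kartta : List String) (kuljettu_reitti : List (Int × Int)) (out : List String) : Prop := out = piirra_kartalle_alt alkuperainen_kartta kuljettu_reitti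
instance (alkuperainen_kartta : List String) (kuljettu_reitti : List (Int × Int)) (out : List String) : Decidable (Spec_piirra_kartalle alkuperainen_kartta kuljettu_reitti out) := by unfold Spec_piirra_kartalle; infer_instance

-- ===== CLAIM (what is proved, stated in full; the proofs are below) =====
def Claim_equal_piirra_kartalle : Prop := ∀ (alkuperainen_kartta : List String) (kuljettu_reitti : List (Int × Int)), Dom_piirra_kartalle alkuperainen_kartta kuljettu_reitti → Spec_piirra_kartalle alkuperainen_kartta kuljettu_reitti (piirra_kartalle alkuperainen_kartta kuljettu_reitti)

-- ===== LEMMAS AND PROOFS =====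

-- the common specification: char (r,c) becomes '*' iff (r,c) is on the route
def markRow (reitti : List (Int × Int)) (r : Nat) (row : List Char) : List Char :=
  row.mapIdx (fun c ch => if ((r : Int), (c : Int)) ∈ reitti then '*' else ch)

-- partial mark: only the first n columns tested (inner-loop invariant for A)
def markRowN (reitti : List (Int × Int)) (r : Nat) (n : Nat) (row : List Char) : List Char :=
  row.mapIdx (fun c ch => if c < n ∧ ((r : Int), (c : Int)) ∈ reitti then '*' else ch)

def specF (reitti : List (Int × Int)) (kartta : List String) : List String :=
  kartta.mapIdx (fun r row => String.ofList (markRow reitti r row.toList))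

lemma length_markRowN (reitti r n row) : (markRowN reitti r n row).length = row.length := by
  simp [markRowN]

lemma markRowN_zero (reitti r row) : markRowN reitti r 0 row = row := by
  apply List.ext_getElem <;> simp [markRowN]

lemma markRowN_top (reitti r row) : markRowN reitti r row.length row = markRow reitti r row := by
  apply List.ext_getElem
  · simp [markRowN, markRow]
  · intro i h1 h2
    simp [markRowN, markRow] at h1 ⊢
    simp [h1]

lemma markRowN_succ_mem (reitti : List (Int × Int)) (r n : Nat) (row : List Char)
    (hn : n < row.length) (hm : ((r : Int), (n : Int)) ∈ reitti) :
    markRowN reitti r (n+1) row =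
      (markRowN reitti r n row).take n ++ ['*'] ++ (markRowN reitti r n row).drop (n+1) := by
  have hn' : n < (markRowN reitti r n row).length := by rwa [length_markRowN]
  have hset : (markRowN reitti r n row).set n '*'
      = (markRowN reitti r n row).take n ++ '*' :: (markRowN reitti r n row).drop (n+1) := by
    rw [List.set_eq_take_append_cons_drop, if_pos hn']
  rw [List.append_assoc, List.singleton_append, ← hset]
  apply List.ext_getElem
  · simp [markRowN]
  · intro i h1 h2
    simp only [markRowN, List.length_mapIdx] at h1
    rw [List.getElem_set]
    by_cases hi : n = i
    · subst hi
      simp [markRowN, hm]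
    · simp only [if_neg hi, markRowN, List.getElem_mapIdx]
      have : i < n + 1 ↔ i < n := by omega
      simp only [this]

lemma markRowN_succ_not (reitti : List (Int × Int)) (r n : Nat) (row : List Char)
    (hm : ((r : Int), (n : Int)) ∉ reitti) :
    markRowN reitti r (n+1) row = markRowN reitti r n row := by
  apply List.ext_getElem
  · simp [markRowN]
  · intro i h1 h2
    simp only [markRowN, List.length_mapIdx] at h1
    simp only [markRowN, List.getElem_mapIdx]
    by_cases hi : i = n
    · subst hi; simp [hm]
    · have : i < n + 1 ↔ i < n := by omega
      simp only [this]

-- A's inner loop marks exactly the first n columns of row r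
lemma inner_loop (reitti : List (Int × Int)) (r : Nat) (acc : List String) (row : List Char)
    (hr : r < acc.length) (hrow : (acc.getD r "").toList = row) :
    ∀ n, n ≤ row.length →
      (List.range n).foldl (fun acc2 (c : Nat) =>
        if ((r : Int), (c : Int)) ∈ reitti then
          acc2.set r (vaihda_merkki c (acc2.getD r ""))
        else acc2) acc
      = acc.set r (String.ofList (markRowN reitti r n row)) := by
  intro n
  induction n with
  | zero =>
    intro _
    rw [markRowN_zero, ← hrow, String.ofList_toList, List.getD_eq_getElem _ _ hr,
      List.set_getElem_self]
    simp
  | succ n ih =>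
    intro hle
    have hn : n < row.length := by omega
    rw [List.range_succ, List.foldl_append, ih (by omega)]
    simp only [List.foldl_cons, List.foldl_nil]
    by_cases hm : ((r : Int), (n : Int)) ∈ reitti
    · rw [if_pos hm]
      have hr' : r < (acc.set r (String.ofList (markRowN reitti r n row))).length := by
        simpa using hr
      rw [List.getD_eq_getElem _ _ hr', List.getElem_set_self, List.set_set]
      congr 1
      have hlen : (String.ofList (markRowN reitti r n row)).toList.length = row.length := by
        rw [String.toList_ofList, length_markRowN]
      rw [markRowN_succ_mem reitti r n row hn hm]
      unfold vaihda_merkki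
      rw [String.toList_ofList] at *
      split_ifs with hge
      · have hdrop : (markRowN reitti r n row).drop (n+1) = [] := by
          apply List.drop_eq_nil_of_le
          rw [length_markRowN]; omega
        rw [hdrop, List.append_nil]
      · rfl
    · rw [if_neg hm, markRowN_succ_not reitti r n row hm]

def partK (reitti : List (Int × Int)) (kartta : List String) (k : Nat) : List String :=
  kartta.mapIdx (fun r row => if r < k then String.ofList (markRow reitti r row.toList) else row)

lemma outer_loop (reitti : List (Int × Int)) (kartta : List String) :
    ∀ k, k ≤ kartta.length →
      (List.range k).foldl (fun acc (r : Nat) =>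
        (List.range (acc.getD r "").toList.length).foldl (fun acc2 (c : Nat) =>
          if ((r : Int), (c : Int)) ∈ reitti then
            acc2.set r (vaihda_merkki c (acc2.getD r ""))
          else acc2) acc) kartta
      = partK reitti kartta k := by
  intro k
  induction k with
  | zero =>
    intro _
    apply List.ext_getElem <;> simp [partK]
  | succ k ih =>
    intro hle
    have hk : k < kartta.length := by omega
    rw [List.range_succ, List.foldl_append, ih (by omega)]
    simp only [List.foldl_cons, List.foldl_nil]
    have hklen : k < (partK reitti kartta k).length := by simpa [partK] using hk
    have hget : (partK reitti kartta k).getD k "" = kartta[k] := by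
      rw [List.getD_eq_getElem _ _ hklen]
      simp [partK]
    rw [inner_loop reitti k (partK reitti kartta k) ((partK reitti kartta k).getD k "").toList
      hklen rfl _ (le_refl _), hget, markRowN_top]
    apply List.ext_getElem
    · simp [partK]
    · intro i h1 h2
      simp only [partK, List.length_mapIdx] at h2
      rw [List.getElem_set]
      by_cases hi : k = i
      · subst hi
        simp [partK]
      · simp only [if_neg hi, partK, List.getElem_mapIdx]
        have : i < k + 1 ↔ i < k := by omega
        simp only [this]

lemma a_eq_spec (kartta : List String) (reitti : List (Int × Int)) :
    piirra_kartalle kartta reitti = specF reitti kartta := by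
  unfold piirra_kartalle
  rw [outer_loop reitti kartta kartta.length (le_refl _)]
  apply List.ext_getElem
  · simp [partK, specF]
  · intro i h1 h2
    simp only [partK, List.length_mapIdx] at h1
    simp [partK, specF, h1]

lemma length_altStep (kartta : List String) (p : Int × Int) :
    (pvAltStep kartta p).length = kartta.length := by
  unfold pvAltStep
  split_ifs <;> simp

lemma markRow_nil (r : Nat) (row : List Char) : markRow [] r row = row := by
  apply List.ext_getElem <;> simp [markRow]

lemma markRow_single (p : Int × Int) (r : Nat) (row : List Char) :
    markRow [p] r row =
      if p.1 = (r : Int) ∧ 0 ≤ p.2 ∧ p.2 < (row.length : Int) then row.set p.2.toNat '*'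
      else row := by
  split_ifs with h
  · apply List.ext_getElem
    · simp [markRow]
    · intro i h1 h2
      simp only [markRow, List.length_mapIdx] at h1
      simp only [markRow, List.getElem_mapIdx, List.getElem_set, List.mem_singleton,
        Prod.ext_iff]
      by_cases hi : p.2.toNat = i
      · have : (r : Int) = p.1 ∧ (i : Int) = p.2 := by omega
        simp [hi, this]
      · have : ¬((r : Int) = p.1 ∧ (i : Int) = p.2) := by omega
        simp [hi, this]
  · apply List.ext_getElem
    · simp [markRow]
    · intro i h1 h2
      simp only [markRow, List.length_mapIdx] at h1
      simp only [markRow, List.getElem_mapIdx, List.mem_singleton, Prod.ext_iff]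
      have : ¬((r : Int) = p.1 ∧ (i : Int) = p.2) := by omega
      simp [this]

lemma altStep_get (kartta : List String) (p : Int × Int) (r : Nat) (hr : r < kartta.length) :
    ((pvAltStep kartta p)[r]'(by rw [length_altStep]; exact hr)).toList
      = markRow [p] r (kartta[r]).toList := by
  rw [markRow_single]
  unfold pvAltStep
  by_cases h1 : 0 ≤ p.1 ∧ p.1 < (kartta.length : Int)
  · simp only [if_pos h1]
    have hget : kartta.getD p.1.toNat "" = kartta[p.1.toNat]'(by omega) := by
      apply List.getD_eq_getElem
    by_cases h2 : 0 ≤ p.2 ∧ p.2 < ((kartta.getD p.1.toNat "").toList.length : Int)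
    · simp only [if_pos h2]
      simp only [hget] at h2 ⊢
      by_cases hpr : p.1.toNat = r
      · subst hpr
        have hcond : p.1 = ((p.1.toNat : Nat) : Int) ∧ 0 ≤ p.2 ∧
            p.2 < (((kartta[p.1.toNat]'(by omega)).toList.length : Nat) : Int) := by
          refine ⟨by omega, h2.1, h2.2⟩
        rw [List.getElem_set_self, if_pos hcond, String.toList_ofList,
          List.set_eq_take_append_cons_drop,
          if_pos (show p.2.toNat < (kartta[p.1.toNat]'(by omega)).toList.length by omega)]
        simp
      · rw [List.getElem_set_ne (by omega)]
        have : ¬(p.1 = (r : Int) ∧ 0 ≤ p.2 ∧ p.2 < ((kartta[r]).toList.length : Int)) := by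
          intro hc; exact hpr (by omega)
        rw [if_neg this]
    · simp only [if_neg h2]
      simp only [hget] at h2
      by_cases hpr : p.1.toNat = r
      · subst hpr
        have : ¬(p.1 = ((p.1.toNat : Nat) : Int) ∧ 0 ≤ p.2 ∧
            p.2 < (((kartta[p.1.toNat]'(by omega)).toList.length : Nat) : Int)) := by
          intro hc; exact h2 ⟨hc.2.1, hc.2.2⟩
        rw [if_neg this]
      · have : ¬(p.1 = (r : Int) ∧ 0 ≤ p.2 ∧ p.2 < ((kartta[r]).toList.length : Int)) := by
          intro hc; exact hpr (by omega)
        rw [if_neg this]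
  · simp only [if_neg h1]
    have : ¬(p.1 = (r : Int) ∧ 0 ≤ p.2 ∧ p.2 < ((kartta[r]).toList.length : Int)) := by
      intro hc; exact h1 ⟨by omega, by omega⟩
    rw [if_neg this]

lemma markRow_markRow (p : Int × Int) (rest : List (Int × Int)) (r : Nat) (row : List Char) :
    markRow rest r (markRow [p] r row) = markRow (p :: rest) r row := by
  apply List.ext_getElem
  · simp [markRow]
  · intro i h1 h2
    simp only [markRow, List.length_mapIdx] at h1 h2
    simp only [markRow, List.getElem_mapIdx, List.mem_cons]
    by_cases ha : ((r : Int), (i : Int)) ∈ rest <;>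
      by_cases hb : ((r : Int), (i : Int)) = p <;> simp [ha, hb]

lemma spec_cons (p : Int × Int) (rest : List (Int × Int)) (kartta : List String) :
    specF (p :: rest) kartta = specF rest (pvAltStep kartta p) := by
  apply List.ext_getElem
  · simp [specF, length_altStep]
  · intro i h1 h2
    simp only [specF, List.length_mapIdx] at h1 h2
    rw [length_altStep] at h2
    simp only [specF, List.getElem_mapIdx]
    rw [altStep_get kartta p i h2, markRow_markRow]

lemma b_eq_spec (reitti : List (Int × Int)) : ∀ (kartta : List String),
    piirra_kartalle_alt kartta reitti = specF reitti kartta := by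
  induction reitti with
  | nil =>
    intro kartta
    unfold piirra_kartalle_alt
    apply List.ext_getElem
    · simp [specF]
    · intro i h1 h2
      simp [specF, List.getElem_mapIdx, markRow_nil, String.ofList_toList]
  | cons p rest ih =>
    intro kartta
    unfold piirra_kartalle_alt at *
    rw [List.foldl_cons, ih, spec_cons]

-- ===== VERDICT (by name: the statement is the Claim_ definition above) =====
theorem piirra_kartalle_spec : Claim_equal_piirra_kartalle := by
  intro kartta reitti _
  unfold Spec_piirra_kartalle
  rw [a_eq_spec, b_eq_spec]
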